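-- pv_equiv track=rewrite | github.com/eddmpython/dartlab | experiments/063_tableMapper/006_headerMatching.py | parseSubtableRows
-- ===== SOURCE A (Python) =====
-- def parseSubtableRows(lines: list[str]) -> list[tuple[str, str]]:
--     """서브테이블 → (항목, 나머지) 리스트. 헤더/구분선 제외."""
--     rows: list[tuple[str, str]] = []
--     headerDone = False
--     for line in lines:
--         cells = [c.strip() for c in line.strip("|").split("|")]
--         isSep = all(set(c.strip()) <= {"-", ":"} for c in cells if c.strip())
--         if isSep:
--             headerDone = True
--             continue
--         if not headerDone:
--             continue
--         label = cells[0] if cells else ""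
--         value = " | ".join(cells[1:]) if len(cells) > 1 else ""
--         if label.strip():
--             rows.append((label.strip(), value.strip()))
--     return rows
-- ===== SOURCE B (Python) =====
-- def parseSubtableRows(lines: list[str]) -> list[tuple[str, str]]:
--     """서브테이블 → (항목, 나머지) 리스트. 헤더/구분선 제외."""
--     def cellsOf(line: str) -> list[str]:
--         return [c.strip() for c in line.strip("|").split("|")]
--
--     def isSep(cells: list[str]) -> bool:
--         return all(set(c.strip()) <= {"-", ":"} for c in cells if c.strip())
--
--     sepIdx = next((i for i, ln in enumerate(lines) if isSep(cellsOf(ln))), None)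
--     if sepIdx is None:
--         return []
--     rows: list[tuple[str, str]] = []
--     for ln in lines[sepIdx + 1:]:
--         cells = cellsOf(ln)
--         if isSep(cells):
--             continue
--         label = cells[0].strip()
--         if label:
--             rows.append((label, " | ".join(cells[1:]).strip()))
--     return rows
-- ===== Notes on version B (the rewrite author's own statement) =====
-- stated objective: alternative
-- what changed: Replaces A's headerDone-flag state machine over all lines with an explicit find-first-separator-index followed by a single pass over only the lines after that boundary (empty result when no separator exists).
import Mathlib
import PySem

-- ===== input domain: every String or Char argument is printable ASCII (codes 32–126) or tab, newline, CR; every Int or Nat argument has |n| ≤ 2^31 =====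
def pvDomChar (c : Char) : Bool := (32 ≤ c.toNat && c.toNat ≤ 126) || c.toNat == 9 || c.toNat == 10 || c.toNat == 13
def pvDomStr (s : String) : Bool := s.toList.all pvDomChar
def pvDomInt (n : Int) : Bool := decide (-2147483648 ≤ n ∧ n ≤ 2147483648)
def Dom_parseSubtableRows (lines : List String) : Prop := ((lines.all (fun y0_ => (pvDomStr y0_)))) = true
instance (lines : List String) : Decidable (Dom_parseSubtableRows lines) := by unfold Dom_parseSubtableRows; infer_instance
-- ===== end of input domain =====

-- B replaces A's headerDone-flag state machine with find-first-separator-index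
-- then one pass over the tail; same return value (objective: alternative).

-- ===== PORT A =====
-- helper shared by both ports (both Pythons contain this identical code):
-- cells = [c.strip() for c in line.strip("|").split("|")]
def pvCells (line : String) : List (List Char) :=
  (PySem.Chars.splitOn (PySem.Chars.stripChars line.toList ['|']) ['|']).map PySem.Chars.strip

-- all(set(c.strip()) <= {"-", ":"} for c in cells if c.strip())
def pvIsSep (cells : List (List Char)) : Bool :=
  cells.all (fun c =>
    let s := PySem.Chars.strip c
    s.isEmpty || s.all (fun ch => ch == '-' || ch == ':'))

def pvStepA (st : List (String × String) × Bool) (line : String) :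
    List (String × String) × Bool :=
  let cells := pvCells line
  if pvIsSep cells then (st.1, true)          -- headerDone = True; continue
  else if st.2 then                           -- (falls through 'if not headerDone: continue')
    let label := cells.headD []               -- cells[0] if cells else ""
    let value := if 1 < cells.length then PySem.Chars.join " | ".toList cells.tail else []
    if (PySem.Chars.strip label).isEmpty then st
    else (st.1 ++ [(String.ofList (PySem.Chars.strip label),
                    String.ofList (PySem.Chars.strip value))], st.2)
  else st                                     -- if not headerDone: continue

def parseSubtableRows (lines : List String) : List (String × String) :=
  (lines.foldl pvStepA ([], false)).1

-- ===== PORT B =====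
def pvStepB (rows : List (String × String)) (line : String) : List (String × String) :=
  let cells := pvCells line
  if pvIsSep cells then rows
  else
    let label := PySem.Chars.strip (cells.headD [])  -- cells[0].strip(); splitOn never returns []
    if label.isEmpty then rows
    else rows ++ [(String.ofList label,
                   String.ofList (PySem.Chars.strip (PySem.Chars.join " | ".toList cells.tail)))]

def parseSubtableRows_alt (lines : List String) : List (String × String) :=
  match lines.findIdx? (fun ln => pvIsSep (pvCells ln)) with
  | none => []
  | some i => (lines.drop (i + 1)).foldl pvStepB []

-- ===== PRECONDITION & SPEC =====
def Spec_parseSubtableRows (lines : List String) (out : List (String × String)) : Prop := out = parseSubtableRows_alt lines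
instance (lines : List String) (out : List (String × String)) : Decidable (Spec_parseSubtableRows lines out) := by unfold Spec_parseSubtableRows; infer_instance

-- ===== CLAIM (what is proved, stated in full; the proofs are below) =====
def Claim_equal_parseSubtableRows : Prop := ∀ (lines : List String), Dom_parseSubtableRows lines → Spec_parseSubtableRows lines (parseSubtableRows lines)

-- ===== LEMMAS AND PROOFS =====

-- A's guarded value ("" unless there is a second cell) is the unconditional join of the tail
lemma join_tail_eq (sep : List Char) (cells : List (List Char)) :
    (if 1 < cells.length then PySem.Chars.join sep cells.tail else []) =
      PySem.Chars.join sep cells.tail := by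
  split_ifs with h
  · rfl
  · match cells with
    | [] => simp [PySem.Chars.join_nil]
    | [c] => simp [PySem.Chars.join_nil]
    | c :: d :: ds => exact absurd (by simp only [List.length_cons]; omega) h

-- one A-step with headerDone already true is one B-step (and the flag stays true)
lemma stepA_true (rows : List (String × String)) (line : String) :
    pvStepA (rows, true) line = (pvStepB rows line, true) := by
  by_cases hs : pvIsSep (pvCells line)
  · simp [pvStepA, pvStepB, hs]
  · simp [pvStepA, pvStepB, hs]
    rw [join_tail_eq]
    split_ifs <;> rfl

-- A's loop after the first separator computes B's tail loop
lemma loop_true (ls : List String) :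
    ∀ rows : List (String × String),
      ls.foldl pvStepA (rows, true) = (ls.foldl pvStepB rows, true) := by
  induction ls with
  | nil => intro rows; rfl
  | cons l ls ih =>
    intro rows
    rw [List.foldl_cons, List.foldl_cons, stepA_true]
    exact ih _

-- main equivalence
lemma parse_eq (lines : List String) :
    parseSubtableRows lines = parseSubtableRows_alt lines := by
  induction lines with
  | nil => rfl
  | cons l ls ih =>
    by_cases h : pvIsSep (pvCells l)
    · show (List.foldl pvStepA ([], false) (l :: ls)).1 = _
      rw [List.foldl_cons]
      have h1 : pvStepA ([], false) l = ([], true) := by simp [pvStepA, h]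
      rw [h1, loop_true ls []]
      simp [parseSubtableRows_alt, List.findIdx?_cons, h]
    · show (List.foldl pvStepA ([], false) (l :: ls)).1 = _
      have h1 : pvStepA ([], false) l = ([], false) := by simp [pvStepA, h]
      rw [List.foldl_cons, h1]
      have hl : (List.foldl pvStepA ([], false) ls).1 = parseSubtableRows_alt ls := ih
      rw [hl]
      unfold parseSubtableRows_alt
      rw [List.findIdx?_cons]
      simp only [h, Bool.false_eq_true, if_false]
      cases hf : ls.findIdx? (fun ln => pvIsSep (pvCells ln)) with
      | none => simp
      | some i => simp [List.drop_succ_cons]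

-- ===== VERDICT (by name: the statement is the Claim_ definition above) =====
theorem parseSubtableRows_spec : Claim_equal_parseSubtableRows := by
  intro lines _
  unfold Spec_parseSubtableRows
  exact parse_eq lines
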